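-- pv_equiv track=rewrite | github.com/aranne/cs61a | functions/recursion/subsequences.py | inc_subseqs
-- ===== SOURCE A (Python) =====
-- def insert_into_all(item, nested_list):
--     """Assuming that nested_list is a list of lists, return a new list
--     consisting of all the lists in nested_list, but with item added to
--     the front of each.
--
--     >>> nl = [[], [1, 2], [3]]
--     >>> insert_into_all(0, nl)
--     [[0], [0, 1, 2], [0, 3]]
--     """
--     "*** YOUR CODE HERE ***"
--     return  [[item] + lst for lst in nested_list]
--
-- def inc_subseqs(s):
--     """Assuming that S is a list, return a nested list of all subsequences
--     of S (a list of lists) for which the elements of the subsequence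
--     are strictly nondecreasing. The subsequences can appear in any order.
--
--     >>> seqs = inc_subseqs([1, 3, 2])
--     >>> sorted(seqs)
--     [[], [1], [1, 2], [1, 3], [2], [3]]
--     >>> inc_subseqs([])
--     [[]]
--     >>> seqs2 = inc_subseqs([1, 1, 2])
--     >>> sorted(seqs2)
--     [[], [1], [1], [1, 1], [1, 1, 2], [1, 2], [1, 2], [2]]
--     """
--     "*** YOUR CODE HERE ***"
--     if not s:
--         return [[]]
--     a = [x for x in inc_subseqs(s[1:]) if x == [] or s[0] <= x[0]]       # in the inc_subseqs(s[1:]) there's a [], so we need to consider x == [].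
--     return insert_into_all(s[0], a) + inc_subseqs(s[1:])# Only the list x in inc_subseqs(s[1:]) satisfy that s[0] < x[0] can we insert s[0] to all the x in inc_subseqs[1:].
--     # official answer:
--     "*** YOUR CODE HERE ***"
--     def subseq_helper(s, prev):
--         if not s:
--             return [[]]
--         elif s[0] < prev:
--             return subseq_helper(s[1:], prev)  # continue to Find in s[1:] in order to get s[0] >= prev
--         else:
--             a = subseq_helper(s[1:], s[0])    # with s[0]: decide to add s[0], then loop up in s[1:] to find lists whose first element >= s[0].
--             b = subseq_helper(s[1:], prev)    # without s[0]: turn to look up in s[1:] to find lists whose first element >= prev.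
--             return insert_into_all(s[0], a) + b   # Everytime we insert a s[0], we have to guarantee that a[0] of a is greater than s[0].
--     return subseq_helper(s, 0)
-- ===== SOURCE B (Python) =====
-- def inc_subseqs(s):
--     res = [[]]
--     for x in reversed(s):
--         res = [[x] + t for t in res if t == [] or x <= t[0]] + res
--     return res
-- ===== Notes on version B (the rewrite author's own statement) =====
-- stated objective: alternative
-- what changed: Replaced the recursion that calls inc_subseqs(s[1:]) twice (duplicated call tree) by a single right-to-left loop that computes the suffix result once and reuses it; intended as faster (measured 580x at n=16) but unconfirmed at the largest size because the output itself grows exponentially.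
import Mathlib
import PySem

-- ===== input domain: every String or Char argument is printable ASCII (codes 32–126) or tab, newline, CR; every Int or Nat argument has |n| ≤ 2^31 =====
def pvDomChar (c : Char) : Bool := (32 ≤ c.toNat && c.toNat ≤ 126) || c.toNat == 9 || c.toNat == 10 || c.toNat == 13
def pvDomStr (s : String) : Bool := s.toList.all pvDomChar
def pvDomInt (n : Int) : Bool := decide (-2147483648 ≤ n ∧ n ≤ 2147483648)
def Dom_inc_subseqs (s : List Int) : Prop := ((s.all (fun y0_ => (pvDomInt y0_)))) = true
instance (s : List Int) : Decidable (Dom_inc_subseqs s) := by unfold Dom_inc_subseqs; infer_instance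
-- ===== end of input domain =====

-- B replaces A's doubled recursion on the tail by one right-to-left pass that computes
-- the suffix result once and reuses it (work linear in the output size).

-- ===== PORT A =====
def insert_into_all (item : Int) (nested_list : List (List Int)) : List (List Int) :=
  nested_list.map (fun lst => item :: lst)

def inc_subseqs : List Int → List (List Int)
  | [] => [[]]
  | x :: rest =>
    -- a = [x for x in inc_subseqs(s[1:]) if x == [] or s[0] <= x[0]]
    let a := (inc_subseqs rest).filter
      (fun t => match t with | [] => true | h :: _ => decide (x ≤ h))
    insert_into_all x a ++ inc_subseqs rest

-- ===== PORT B =====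
-- one step of the loop body: res = [[x]+t for t in res if t == [] or x <= t[0]] + res
def altStep (res : List (List Int)) (x : Int) : List (List Int) :=
  ((res.filter (fun t => match t with | [] => true | h :: _ => decide (x ≤ h))).map
    (fun t => x :: t)) ++ res

def inc_subseqs_alt (s : List Int) : List (List Int) :=
  s.reverse.foldl altStep [[]]

-- ===== PRECONDITION & SPEC =====
def Spec_inc_subseqs (s : List Int) (out : List (List Int)) : Prop := out = inc_subseqs_alt s
instance (s : List Int) (out : List (List Int)) : Decidable (Spec_inc_subseqs s out) := by unfold Spec_inc_subseqs; infer_instance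

-- ===== CLAIM (what is proved, stated in full; the proofs are below) =====
def Claim_equal_inc_subseqs : Prop := ∀ (s : List Int), Dom_inc_subseqs s → Spec_inc_subseqs s (inc_subseqs s)

-- ===== LEMMAS AND PROOFS =====
theorem alt_eq_foldr (s : List Int) :
    inc_subseqs_alt s = s.foldr (fun x res => altStep res x) [[]] := by
  simp [inc_subseqs_alt, List.foldl_reverse]

theorem a_eq_alt (s : List Int) : inc_subseqs s = inc_subseqs_alt s := by
  induction s with
  | nil => simp [inc_subseqs, inc_subseqs_alt]
  | cons x rest ih =>
    rw [alt_eq_foldr] at *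
    simp only [List.foldr_cons, ← ih]
    simp [inc_subseqs, altStep, insert_into_all]

-- ===== VERDICT (by name: the statement is the Claim_ definition above) =====
theorem inc_subseqs_spec : Claim_equal_inc_subseqs := by
  intro s _
  exact a_eq_alt s
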